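-- pv_equiv track=rewrite | github.com/pavelliavonau/cmakeconverter | cmake_converter/utils.py | make_os_specific_shell_path
-- ===== SOURCE A (Python) =====
-- def make_os_specific_shell_path(output):
--     variables_to_replace = {
--         '$(SolutionDir)': '${CMAKE_SOURCE_DIR}/',
--         '$(ProjectDir)': '${CMAKE_CURRENT_SOURCE_DIR}/',
--         '$(OutDir)': '${OUTPUT_DIRECTORY}',
--         '$(TargetPath)': '$<TARGET_FILE:${PROJECT_NAME}>',
--     }
--     for var in variables_to_replace:
--         if var in output:
--             output = output.replace(var, '$<SHELL_PATH:{0}>'.format(variables_to_replace[var]))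
--
--     return output
-- ===== SOURCE B (Python) =====
-- def make_os_specific_shell_path(output):
--     mapping = {
--         '$(SolutionDir)': '${CMAKE_SOURCE_DIR}/',
--         '$(ProjectDir)': '${CMAKE_CURRENT_SOURCE_DIR}/',
--         '$(OutDir)': '${OUTPUT_DIRECTORY}',
--         '$(TargetPath)': '$<TARGET_FILE:${PROJECT_NAME}>',
--     }
--     res = []
--     i = 0
--     n = len(output)
--     while i < n:
--         for var in mapping:
--             if output.startswith(var, i):
--                 res.append('$<SHELL_PATH:{0}>'.format(mapping[var]))
--                 i += len(var)
--                 break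
--         else:
--             res.append(output[i])
--             i += 1
--     return ''.join(res)
-- ===== Notes on version B (the rewrite author's own statement) =====
-- stated objective: alternative
-- what changed: A runs four sequential whole-string replace passes (one per VS variable, each rescanning the already-rewritten string); B makes a single left-to-right scan that at each position matches the four variables in dict order, emits the wrapped replacement and skips past the match, so replaced text is never rescanned.
import Mathlib
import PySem

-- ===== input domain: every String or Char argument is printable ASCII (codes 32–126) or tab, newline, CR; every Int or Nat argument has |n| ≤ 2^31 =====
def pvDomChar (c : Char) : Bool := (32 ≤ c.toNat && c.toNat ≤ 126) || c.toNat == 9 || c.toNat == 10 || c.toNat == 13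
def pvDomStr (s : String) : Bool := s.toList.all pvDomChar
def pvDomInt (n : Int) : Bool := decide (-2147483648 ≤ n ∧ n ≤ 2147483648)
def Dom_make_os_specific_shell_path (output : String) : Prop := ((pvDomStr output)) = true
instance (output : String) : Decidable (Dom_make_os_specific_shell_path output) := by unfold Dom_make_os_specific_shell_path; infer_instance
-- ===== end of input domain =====

-- B replaces A's four sequential full-string replace passes by one left-to-right scan that
-- dispatches each matched VS variable in dict order; same return value (alternative, not faster).

-- ===== PORT A =====
-- the literal dict of A (insertion order)
def pvVarsToReplace : PySem.Dict String String := PySem.Dict.ofList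
  [("$(SolutionDir)", "${CMAKE_SOURCE_DIR}/"),
   ("$(ProjectDir)", "${CMAKE_CURRENT_SOURCE_DIR}/"),
   ("$(OutDir)", "${OUTPUT_DIRECTORY}"),
   ("$(TargetPath)", "$<TARGET_FILE:${PROJECT_NAME}>")]

-- for var in variables_to_replace: if var in output: output = output.replace(var, '$<SHELL_PATH:{0}>'.format(dict[var]))
-- ('{0}'.format(v) on a str is v itself, so the replacement is the concatenation below;
--  dict[var] is total here since var ranges over the keys, ported as getD with an unused default)
def make_os_specific_shell_path (output : String) : String :=
  (PySem.Dict.keys pvVarsToReplace).foldl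
    (fun out var =>
      if PySem.Str.isIn var out then
        PySem.Str.replace out var ("$<SHELL_PATH:" ++ PySem.Dict.getD pvVarsToReplace var "" ++ ">")
      else out)
    output

-- ===== PORT B =====
-- Source B: while i < n: try the four keys of the dict in order via output.startswith(var, i);
-- on a match append the wrapped replacement and jump i by len(var), else copy output[i].
-- The loop is bounded by n - i, ported as the fuel argument (fuel = remaining length suffices);
-- the inner 'for var in mapping' over the 4-key literal dict is unrolled to four ordered tests.
def pvScanB (fuel : Nat) (l : List Char) : List Char :=
  match fuel, l with
  | _, [] => []
  | 0, _ => []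
  | fuel + 1, c :: t =>
    if "$(SolutionDir)".toList.isPrefixOf (c :: t) then
      "$<SHELL_PATH:${CMAKE_SOURCE_DIR}/>".toList ++ pvScanB fuel (List.drop 13 t)
    else if "$(ProjectDir)".toList.isPrefixOf (c :: t) then
      "$<SHELL_PATH:${CMAKE_CURRENT_SOURCE_DIR}/>".toList ++ pvScanB fuel (List.drop 12 t)
    else if "$(OutDir)".toList.isPrefixOf (c :: t) then
      "$<SHELL_PATH:${OUTPUT_DIRECTORY}>".toList ++ pvScanB fuel (List.drop 8 t)
    else if "$(TargetPath)".toList.isPrefixOf (c :: t) then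
      "$<SHELL_PATH:$<TARGET_FILE:${PROJECT_NAME}>>".toList ++ pvScanB fuel (List.drop 12 t)
    else c :: pvScanB fuel t

def make_os_specific_shell_path_alt (output : String) : String :=
  String.ofList (pvScanB output.toList.length output.toList)

-- ===== PRECONDITION & SPEC =====
def Spec_make_os_specific_shell_path (output : String) (out : String) : Prop := out = make_os_specific_shell_path_alt output
instance (output : String) (out : String) : Decidable (Spec_make_os_specific_shell_path output out) := by unfold Spec_make_os_specific_shell_path; infer_instance

-- ===== CLAIM (what is proved, stated in full; the proofs are below) =====
def Claim_equal_make_os_specific_shell_path : Prop := ∀ (output : String), Dom_make_os_specific_shell_path output → Spec_make_os_specific_shell_path output (make_os_specific_shell_path output)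

-- ===== LEMMAS AND PROOFS =====

-- simple recursive characterisation of Python str.replace (old ≠ [])
def pvRep (old new : List Char) : List Char → List Char
  | [] => []
  | c :: t =>
    if old.isPrefixOf (c :: t) && !old.isEmpty then
      new ++ pvRep old new (List.drop (old.length - 1) t)
    else c :: pvRep old new t
termination_by l => l.length
decreasing_by
  · simp only [List.length_drop, List.length_cons]; omega
  · simp

theorem pvGo_eq (old new : List Char) (hk : old ≠ []) :
    ∀ fuel l acc, l.length ≤ fuel →
      PySem.Chars.replace.go old new fuel l acc = acc.reverse ++ pvRep old new l := by
  intro fuel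
  induction fuel with
  | zero =>
    intro l acc h
    have hl : l = [] := by cases l <;> simp_all
    subst hl
    simp [PySem.Chars.replace.go, pvRep]
  | succ n ih =>
    intro l acc h
    cases l with
    | nil => simp [PySem.Chars.replace.go, pvRep]
    | cons c t =>
      obtain ⟨o, old', rfl⟩ : ∃ o old', old = o :: old' := by
        cases old with
        | nil => exact absurd rfl hk
        | cons o old' => exact ⟨o, old', rfl⟩
      rw [PySem.Chars.replace.go]
      by_cases hp : (o :: old').isPrefixOf (c :: t) = true
      · rw [if_pos hp]
        have hdrop : List.drop (o :: old').length (c :: t) = List.drop ((o :: old').length - 1) t := by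
          simp [List.drop_succ_cons]
        have hlen : (List.drop ((o :: old').length - 1) t).length ≤ n := by
          simp [List.length_drop]; simp at h; omega
        rw [hdrop, ih _ _ hlen]
        rw [pvRep]
        simp [hp]
      · rw [if_neg hp]
        have hlen : t.length ≤ n := by simp at h; omega
        rw [ih _ _ hlen]
        rw [pvRep]
        simp [hp]

theorem pvReplace_eq (s old new : List Char) (hk : old ≠ []) :
    PySem.Chars.replace s old new = pvRep old new s := by
  unfold PySem.Chars.replace
  rw [if_neg (by simp [List.isEmpty_iff, hk])]
  rw [pvGo_eq old new hk s.length s [] le_rfl]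
  simp

-- if old does not occur in l, pvRep leaves l unchanged
theorem pvRep_absent (old new : List Char) :
    ∀ l, ¬ (old <:+: l) → pvRep old new l = l := by
  intro l
  induction l with
  | nil => intro _; rw [pvRep]
  | cons c t ih =>
    intro h
    rw [pvRep]
    have hp : old.isPrefixOf (c :: t) = false := by
      rw [Bool.eq_false_iff]
      intro hb
      exact h (List.IsPrefix.isInfix (List.isPrefixOf_iff_prefix.mp hb))
    rw [hp]
    simp [ih (fun hi => h (List.infix_cons hi))]

-- Python 'var in output' guard is redundant: the replace is the identity when absent
theorem pvGStep (s k R : String) (hk : k.toList ≠ []) :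
    (if PySem.Str.isIn k s then PySem.Str.replace s k R else s).toList
      = pvRep k.toList R.toList s.toList := by
  by_cases h : PySem.Str.isIn k s = true
  · rw [if_pos h, PySem.Str.toList_replace, pvReplace_eq _ _ _ hk]
  · rw [if_neg h]
    have : ¬ (k.toList <:+: s.toList) := by
      intro hi
      exact h ((PySem.Str.isIn_iff_infix k s).mpr hi)
    rw [pvRep_absent _ _ _ this]

theorem pvPrefix_append_cases {α : Type} (k w t : List α) (h : k <+: w ++ t) :
    k <+: w ∨ w <+: k := by
  induction w generalizing k with
  | nil => right; exact List.nil_prefix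
  | cons c w' ih =>
    cases k with
    | nil => left; exact List.nil_prefix
    | cons a k' =>
      rw [List.cons_append, List.cons_prefix_cons] at h
      obtain ⟨rfl, h'⟩ := h
      rcases ih k' h' with h1 | h1
      · left; exact List.cons_prefix_cons.mpr ⟨rfl, h1⟩
      · right; exact List.cons_prefix_cons.mpr ⟨rfl, h1⟩

-- "w blocks k": no occurrence of k can start inside w, whatever follows
def pvBlocksB (k w : List Char) : Bool :=
  (List.range w.length).all
    (fun i => !((List.drop i w).isPrefixOf k) && !(k.isPrefixOf (List.drop i w)))

theorem pvRep_pass (k r : List Char) :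
    ∀ w t, pvBlocksB k w = true → pvRep k r (w ++ t) = w ++ pvRep k r t := by
  intro w
  induction w with
  | nil => intro t _; simp
  | cons c w' ih =>
    intro t hb
    simp only [pvBlocksB, List.all_eq_true, List.mem_range, Bool.and_eq_true,
      Bool.not_eq_true', Bool.eq_false_iff, Ne, List.isPrefixOf_iff_prefix] at hb
    have hb0 := hb 0 (by simp)
    simp only [List.drop_zero] at hb0
    have hknil : k ≠ [] := by
      intro hknil
      exact hb0.2 (hknil ▸ List.nil_prefix)
    have hnp : ¬ k <+: (c :: w') ++ t := by
      intro hpk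
      rcases pvPrefix_append_cases k (c :: w') t hpk with h1 | h1
      · exact hb0.2 h1
      · exact hb0.1 h1
    rw [List.cons_append, pvRep]
    have hpf : k.isPrefixOf (c :: (w' ++ t)) = false := by
      rw [Bool.eq_false_iff]
      intro hbp
      exact hnp (by simpa using List.isPrefixOf_iff_prefix.mp hbp)
    rw [hpf]
    have hb' : pvBlocksB k w' = true := by
      simp only [pvBlocksB, List.all_eq_true, List.mem_range, Bool.and_eq_true,
        Bool.not_eq_true', Bool.eq_false_iff, Ne, List.isPrefixOf_iff_prefix]
      intro i hi
      have := hb (i + 1) (by simpa using hi)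
      simpa [List.drop_succ_cons] using this
    simp [ih t hb']

theorem pvRep_fire (k r t : List Char) (hk : k ≠ []) :
    pvRep k r (k ++ t) = r ++ pvRep k r t := by
  obtain ⟨a, k', rfl⟩ : ∃ a k', k = a :: k' := by
    cases k with
    | nil => exact absurd rfl hk
    | cons a k' => exact ⟨a, k', rfl⟩
  rw [List.cons_append, pvRep]
  have hpf : (a :: k').isPrefixOf (a :: (k' ++ t)) = true := by
    rw [List.isPrefixOf_iff_prefix]
    exact List.cons_prefix_cons.mpr ⟨rfl, List.prefix_append k' t⟩
  simp only [hpf, Bool.true_and]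
  rw [if_pos (by simp)]
  have : List.drop ((a :: k').length - 1) (k' ++ t) = t := by
    simp
  rw [this]

-- tails of the four keys never look like the start "$<" of a replacement
def pvC2B : List Char → Bool
  | [] => false
  | [a] => a != '$'
  | a :: b :: _ => (a != '$') || (b != '<')

def pvTCB (p : List Char) : Bool := p.tails.all (fun q => q.isEmpty || pvC2B q)

theorem pvNoPrefixRX (p Y : List Char) (h : pvC2B p = true) : ¬ p <+: ('$' :: '<' :: Y) := by
  intro hp
  match p, h with
  | [a], h =>
    rw [List.cons_prefix_cons] at hp
    obtain ⟨rfl, _⟩ := hp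
    simp [pvC2B] at h
  | a :: b :: rest, h =>
    rw [List.cons_prefix_cons] at hp
    obtain ⟨rfl, hp⟩ := hp
    rw [List.cons_prefix_cons] at hp
    obtain ⟨rfl, _⟩ := hp
    simp [pvC2B] at h

theorem pvTCB_tail (a : Char) (p : List Char) (h : pvTCB (a :: p) = true) : pvTCB p = true := by
  simp only [pvTCB, List.tails_cons, List.all_cons, Bool.and_eq_true] at h
  exact h.2

theorem pvTCB_self (p : List Char) (h : pvTCB p = true) (hne : p ≠ []) : pvC2B p = true := by
  simp only [pvTCB, List.all_eq_true] at h
  have := h p ((List.mem_tails p p).mpr (List.suffix_refl p))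
  simpa [List.isEmpty_iff, hne] using this

-- replacing with a string that starts "$<" can never create a new occurrence of a key
theorem pvRep_no_create (k r'' : List Char) :
    ∀ n l p, l.length ≤ n → pvTCB p = true →
      p <+: pvRep k ('$' :: '<' :: r'') l → p <+: l := by
  intro n
  induction n with
  | zero =>
    intro l p hl _ hp
    have : l = [] := by cases l <;> simp_all
    subst this
    rw [pvRep] at hp
    rw [List.prefix_nil] at hp
    subst hp
    exact List.nil_prefix
  | succ n ih =>
    intro l p hl htc hp
    cases l with
    | nil =>
      rw [pvRep] at hp
      rw [List.prefix_nil] at hp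
      subst hp
      exact List.nil_prefix
    | cons c t =>
      rw [pvRep] at hp
      by_cases hc : (k.isPrefixOf (c :: t) && !k.isEmpty) = true
      · rw [if_pos hc] at hp
        cases p with
        | nil => exact List.nil_prefix
        | cons a p' =>
          exfalso
          have h2 : pvC2B (a :: p') = true := pvTCB_self _ htc (by simp)
          have : (a :: p') <+: ('$' :: '<' :: (r'' ++ pvRep k ('$' :: '<' :: r'') (List.drop (k.length - 1) t))) := by
            simpa using hp
          exact pvNoPrefixRX _ _ h2 this
      · rw [if_neg hc] at hp
        cases p with
        | nil => exact List.nil_prefix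
        | cons a p' =>
          rw [List.cons_prefix_cons] at hp
          obtain ⟨rfl, hp'⟩ := hp
          have ht : t.length ≤ n := by simp at hl; omega
          exact List.cons_prefix_cons.mpr ⟨rfl, ih t p' ht (pvTCB_tail _ _ htc) hp'⟩

-- the four sequential replaces, chained (the char-level core of port A)
def pvChain (l : List Char) : List Char :=
  pvRep "$(TargetPath)".toList "$<SHELL_PATH:$<TARGET_FILE:${PROJECT_NAME}>>".toList
    (pvRep "$(OutDir)".toList "$<SHELL_PATH:${OUTPUT_DIRECTORY}>".toList
      (pvRep "$(ProjectDir)".toList "$<SHELL_PATH:${CMAKE_CURRENT_SOURCE_DIR}/>".toList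
        (pvRep "$(SolutionDir)".toList "$<SHELL_PATH:${CMAKE_SOURCE_DIR}/>".toList l)))

theorem pvStep_none (k r : List Char) (c : Char) (X : List Char) (h : ¬ k <+: c :: X) :
    pvRep k r (c :: X) = c :: pvRep k r X := by
  rw [pvRep]
  have hf : k.isPrefixOf (c :: X) = false := by
    rw [Bool.eq_false_iff]; intro hb; exact h (List.isPrefixOf_iff_prefix.mp hb)
  rw [hf]; simp

theorem pvNC1 (k l p : List Char) (htc : pvTCB p = true)
    (hp : p <+: pvRep k "$<SHELL_PATH:${CMAKE_SOURCE_DIR}/>".toList l) : p <+: l := by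
  have h : "$<SHELL_PATH:${CMAKE_SOURCE_DIR}/>".toList
      = '$' :: '<' :: "SHELL_PATH:${CMAKE_SOURCE_DIR}/>".toList := by simp
  rw [h] at hp
  exact pvRep_no_create _ _ l.length l p le_rfl htc hp

theorem pvNC2 (k l p : List Char) (htc : pvTCB p = true)
    (hp : p <+: pvRep k "$<SHELL_PATH:${CMAKE_CURRENT_SOURCE_DIR}/>".toList l) : p <+: l := by
  have h : "$<SHELL_PATH:${CMAKE_CURRENT_SOURCE_DIR}/>".toList
      = '$' :: '<' :: "SHELL_PATH:${CMAKE_CURRENT_SOURCE_DIR}/>".toList := by simp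
  rw [h] at hp
  exact pvRep_no_create _ _ l.length l p le_rfl htc hp

theorem pvNC3 (k l p : List Char) (htc : pvTCB p = true)
    (hp : p <+: pvRep k "$<SHELL_PATH:${OUTPUT_DIRECTORY}>".toList l) : p <+: l := by
  have h : "$<SHELL_PATH:${OUTPUT_DIRECTORY}>".toList
      = '$' :: '<' :: "SHELL_PATH:${OUTPUT_DIRECTORY}>".toList := by simp
  rw [h] at hp
  exact pvRep_no_create _ _ l.length l p le_rfl htc hp

theorem pvScan_fire1 (n : Nat) (t1 : List Char) :
    pvScanB (n+1) ("$(SolutionDir)".toList ++ t1)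
      = "$<SHELL_PATH:${CMAKE_SOURCE_DIR}/>".toList ++ pvScanB n t1 := by
  have h : "$(SolutionDir)".toList ++ t1
      = '$'::'('::'S'::'o'::'l'::'u'::'t'::'i'::'o'::'n'::'D'::'i'::'r'::')'::t1 := by simp
  rw [h, pvScanB]
  simp [List.isPrefixOf, List.drop]

theorem pvScan_fire2 (n : Nat) (t1 : List Char) :
    pvScanB (n+1) ("$(ProjectDir)".toList ++ t1)
      = "$<SHELL_PATH:${CMAKE_CURRENT_SOURCE_DIR}/>".toList ++ pvScanB n t1 := by
  have h : "$(ProjectDir)".toList ++ t1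
      = '$'::'('::'P'::'r'::'o'::'j'::'e'::'c'::'t'::'D'::'i'::'r'::')'::t1 := by simp
  rw [h, pvScanB]
  simp [List.isPrefixOf, List.drop]

theorem pvScan_fire3 (n : Nat) (t1 : List Char) :
    pvScanB (n+1) ("$(OutDir)".toList ++ t1)
      = "$<SHELL_PATH:${OUTPUT_DIRECTORY}>".toList ++ pvScanB n t1 := by
  have h : "$(OutDir)".toList ++ t1
      = '$'::'('::'O'::'u'::'t'::'D'::'i'::'r'::')'::t1 := by simp
  rw [h, pvScanB]
  simp [List.isPrefixOf, List.drop]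

theorem pvScan_fire4 (n : Nat) (t1 : List Char) :
    pvScanB (n+1) ("$(TargetPath)".toList ++ t1)
      = "$<SHELL_PATH:$<TARGET_FILE:${PROJECT_NAME}>>".toList ++ pvScanB n t1 := by
  have h : "$(TargetPath)".toList ++ t1
      = '$'::'('::'T'::'a'::'r'::'g'::'e'::'t'::'P'::'a'::'t'::'h'::')'::t1 := by simp
  rw [h, pvScanB]
  simp [List.isPrefixOf, List.drop]

theorem pvMain : ∀ n l, l.length ≤ n → pvChain l = pvScanB n l := by
  intro n
  induction n with
  | zero =>
    intro l h
    have hl : l = [] := by cases l <;> simp_all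
    subst hl
    simp [pvChain, pvRep, pvScanB]
  | succ n ih =>
    intro l hl
    cases l with
    | nil => simp [pvChain, pvRep, pvScanB]
    | cons c t =>
      by_cases h1 : "$(SolutionDir)".toList <+: c :: t
      · obtain ⟨t1, ht1⟩ := h1
        rw [← ht1] at hl ⊢
        have hlen : t1.length ≤ n := by simp at hl; omega
        unfold pvChain
        rw [pvRep_fire _ _ _ (by decide)]
        rw [pvRep_pass _ _ _ _ (by decide), pvRep_pass _ _ _ _ (by decide),
          pvRep_pass _ _ _ _ (by decide)]
        rw [pvScan_fire1]
        have hrec := ih t1 hlen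
        unfold pvChain at hrec
        rw [hrec]
      · by_cases h2 : "$(ProjectDir)".toList <+: c :: t
        · obtain ⟨t1, ht1⟩ := h2
          rw [← ht1] at hl ⊢
          have hlen : t1.length ≤ n := by simp at hl; omega
          unfold pvChain
          rw [pvRep_pass _ _ _ _ (by decide)]
          rw [pvRep_fire _ _ _ (by decide)]
          rw [pvRep_pass _ _ _ _ (by decide), pvRep_pass _ _ _ _ (by decide)]
          rw [pvScan_fire2]
          have hrec := ih t1 hlen
          unfold pvChain at hrec
          rw [hrec]
        · by_cases h3 : "$(OutDir)".toList <+: c :: t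
          · obtain ⟨t1, ht1⟩ := h3
            rw [← ht1] at hl ⊢
            have hlen : t1.length ≤ n := by simp at hl; omega
            unfold pvChain
            rw [pvRep_pass _ _ _ _ (by decide), pvRep_pass _ _ _ _ (by decide)]
            rw [pvRep_fire _ _ _ (by decide)]
            rw [pvRep_pass _ _ _ _ (by decide)]
            rw [pvScan_fire3]
            have hrec := ih t1 hlen
            unfold pvChain at hrec
            rw [hrec]
          · by_cases h4 : "$(TargetPath)".toList <+: c :: t
            · obtain ⟨t1, ht1⟩ := h4
              rw [← ht1] at hl ⊢
              have hlen : t1.length ≤ n := by simp at hl; omega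
              unfold pvChain
              rw [pvRep_pass _ _ _ _ (by decide), pvRep_pass _ _ _ _ (by decide),
                pvRep_pass _ _ _ _ (by decide)]
              rw [pvRep_fire _ _ _ (by decide)]
              rw [pvScan_fire4]
              have hrec := ih t1 hlen
              unfold pvChain at hrec
              rw [hrec]
            · -- no key matches at this position: both sides copy c
              have hlen : t.length ≤ n := by simp at hl; omega
              have hn1 : pvRep "$(SolutionDir)".toList "$<SHELL_PATH:${CMAKE_SOURCE_DIR}/>".toList (c :: t)
                  = c :: pvRep "$(SolutionDir)".toList "$<SHELL_PATH:${CMAKE_SOURCE_DIR}/>".toList t :=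
                pvStep_none _ _ _ _ h1
              have hA2 : ¬ "$(ProjectDir)".toList <+:
                  pvRep "$(SolutionDir)".toList "$<SHELL_PATH:${CMAKE_SOURCE_DIR}/>".toList (c :: t) :=
                fun hx => h2 (pvNC1 _ _ _ (by decide) hx)
              have hn2 : pvRep "$(ProjectDir)".toList "$<SHELL_PATH:${CMAKE_CURRENT_SOURCE_DIR}/>".toList
                    (pvRep "$(SolutionDir)".toList "$<SHELL_PATH:${CMAKE_SOURCE_DIR}/>".toList (c :: t))
                  = c :: pvRep "$(ProjectDir)".toList "$<SHELL_PATH:${CMAKE_CURRENT_SOURCE_DIR}/>".toList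
                    (pvRep "$(SolutionDir)".toList "$<SHELL_PATH:${CMAKE_SOURCE_DIR}/>".toList t) := by
                rw [hn1]
                exact pvStep_none _ _ _ _ (by rw [← hn1]; exact hA2)
              have hA3 : ¬ "$(OutDir)".toList <+:
                  pvRep "$(ProjectDir)".toList "$<SHELL_PATH:${CMAKE_CURRENT_SOURCE_DIR}/>".toList
                    (pvRep "$(SolutionDir)".toList "$<SHELL_PATH:${CMAKE_SOURCE_DIR}/>".toList (c :: t)) :=
                fun hx => h3 (pvNC1 _ _ _ (by decide) (pvNC2 _ _ _ (by decide) hx))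
              have hn3 : pvRep "$(OutDir)".toList "$<SHELL_PATH:${OUTPUT_DIRECTORY}>".toList
                    (pvRep "$(ProjectDir)".toList "$<SHELL_PATH:${CMAKE_CURRENT_SOURCE_DIR}/>".toList
                      (pvRep "$(SolutionDir)".toList "$<SHELL_PATH:${CMAKE_SOURCE_DIR}/>".toList (c :: t)))
                  = c :: pvRep "$(OutDir)".toList "$<SHELL_PATH:${OUTPUT_DIRECTORY}>".toList
                    (pvRep "$(ProjectDir)".toList "$<SHELL_PATH:${CMAKE_CURRENT_SOURCE_DIR}/>".toList
                      (pvRep "$(SolutionDir)".toList "$<SHELL_PATH:${CMAKE_SOURCE_DIR}/>".toList t)) := by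
                rw [hn2]
                exact pvStep_none _ _ _ _ (by rw [← hn2]; exact hA3)
              have hA4 : ¬ "$(TargetPath)".toList <+:
                  pvRep "$(OutDir)".toList "$<SHELL_PATH:${OUTPUT_DIRECTORY}>".toList
                    (pvRep "$(ProjectDir)".toList "$<SHELL_PATH:${CMAKE_CURRENT_SOURCE_DIR}/>".toList
                      (pvRep "$(SolutionDir)".toList "$<SHELL_PATH:${CMAKE_SOURCE_DIR}/>".toList (c :: t))) :=
                fun hx => h4 (pvNC1 _ _ _ (by decide) (pvNC2 _ _ _ (by decide)
                  (pvNC3 _ _ _ (by decide) hx)))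
              have hn4 : pvChain (c :: t) = c :: pvChain t := by
                unfold pvChain
                rw [hn3]
                exact pvStep_none _ _ _ _ (by rw [← hn3]; exact hA4)
              rw [hn4, ih t hlen]
              have g1 : "$(SolutionDir)".toList.isPrefixOf (c :: t) = false := by
                rw [Bool.eq_false_iff]; intro hb; exact h1 (List.isPrefixOf_iff_prefix.mp hb)
              have g2 : "$(ProjectDir)".toList.isPrefixOf (c :: t) = false := by
                rw [Bool.eq_false_iff]; intro hb; exact h2 (List.isPrefixOf_iff_prefix.mp hb)
              have g3 : "$(OutDir)".toList.isPrefixOf (c :: t) = false := by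
                rw [Bool.eq_false_iff]; intro hb; exact h3 (List.isPrefixOf_iff_prefix.mp hb)
              have g4 : "$(TargetPath)".toList.isPrefixOf (c :: t) = false := by
                rw [Bool.eq_false_iff]; intro hb; exact h4 (List.isPrefixOf_iff_prefix.mp hb)
              conv_rhs => rw [pvScanB]
              rw [g1, g2, g3, g4]
              simp

-- ===== VERDICT (by name: the statement is the Claim_ definition above) =====
theorem make_os_specific_shell_path_spec : Claim_equal_make_os_specific_shell_path := by
  intro output _
  unfold Spec_make_os_specific_shell_path
  rw [← String.toList_inj]
  have hkeys : PySem.Dict.keys pvVarsToReplace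
      = ["$(SolutionDir)", "$(ProjectDir)", "$(OutDir)", "$(TargetPath)"] := by decide
  unfold make_os_specific_shell_path
  rw [hkeys]
  simp only [List.foldl]
  rw [pvGStep _ _ _ (by decide), pvGStep _ _ _ (by decide), pvGStep _ _ _ (by decide),
    pvGStep _ _ _ (by decide)]
  have hv1 : ("$<SHELL_PATH:" ++ PySem.Dict.getD pvVarsToReplace "$(SolutionDir)" "" ++ ">").toList
      = "$<SHELL_PATH:${CMAKE_SOURCE_DIR}/>".toList := by decide
  have hv2 : ("$<SHELL_PATH:" ++ PySem.Dict.getD pvVarsToReplace "$(ProjectDir)" "" ++ ">").toList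
      = "$<SHELL_PATH:${CMAKE_CURRENT_SOURCE_DIR}/>".toList := by decide
  have hv3 : ("$<SHELL_PATH:" ++ PySem.Dict.getD pvVarsToReplace "$(OutDir)" "" ++ ">").toList
      = "$<SHELL_PATH:${OUTPUT_DIRECTORY}>".toList := by decide
  have hv4 : ("$<SHELL_PATH:" ++ PySem.Dict.getD pvVarsToReplace "$(TargetPath)" "" ++ ">").toList
      = "$<SHELL_PATH:$<TARGET_FILE:${PROJECT_NAME}>>".toList := by decide
  rw [hv1, hv2, hv3, hv4]
  have hmain := pvMain output.toList.length output.toList le_rfl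
  unfold pvChain at hmain
  rw [hmain]
  simp [make_os_specific_shell_path_alt, String.toList_ofList]
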